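-- pv_equiv track=rewrite | github.com/wasabi39/ipsa | Exercise 9.1 (bitonic minimum).py | bitonic_minimum
-- ===== SOURCE A (Python) =====
-- def bitonic_minimum(l):
--     if isinstance(l, int): #på vej ud af rekursionen returnerer vi bare det ene element
--         return l
--     elif len(l) < 2: #returnerer det eneste element i rekursionen, når vi kun har et element tilbage
--         return l[0]
--     elif l[len(l) // 2] < l[len(l) // 2 - 1]: #tjekker om venstre halvdel indeholder det mindste element
--         return bitonic_minimum(l[len(l) // 2:])
--     else: #ellers bruger vi højre halvdel
--         return bitonic_minimum(l[:len(l) // 2])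
-- ===== SOURCE B (Python) =====
-- def bitonic_minimum(l):
--     if isinstance(l, int):
--         return l
--     lo, hi = 0, len(l)
--     while hi - lo >= 2:
--         mid = lo + (hi - lo) // 2
--         if l[mid] < l[mid - 1]:
--             lo = mid
--         else:
--             hi = mid
--     return l[lo]
-- ===== Notes on version B (the rewrite author's own statement) =====
-- stated objective: alternative
-- what changed: Replaced A's recursion on list slices (each step copies half the list) by an iterative binary search maintaining integer bounds lo/hi over the original list, returning l[lo].
-- outside the precondition, e.g. on bitonic_minimum([]): A raises IndexError, B raises IndexError
import Mathlib
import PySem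

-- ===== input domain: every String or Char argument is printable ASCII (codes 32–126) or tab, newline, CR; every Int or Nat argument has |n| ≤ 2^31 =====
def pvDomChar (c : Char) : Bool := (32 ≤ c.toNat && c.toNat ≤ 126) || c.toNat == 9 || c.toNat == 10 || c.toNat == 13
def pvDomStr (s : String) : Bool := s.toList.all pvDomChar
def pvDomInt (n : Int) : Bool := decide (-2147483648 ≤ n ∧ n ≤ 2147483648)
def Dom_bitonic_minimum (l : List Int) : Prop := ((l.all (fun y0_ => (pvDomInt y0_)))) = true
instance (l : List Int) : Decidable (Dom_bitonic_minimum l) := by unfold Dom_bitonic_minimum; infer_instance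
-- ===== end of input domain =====

-- B replaces A's recursion on list slices by an iterative binary search on index bounds
-- over the original list; equivalence of the RETURN value is proved on non-empty lists.

-- ===== PORT A =====
-- A recurses on Python slices l[len//2:] / l[:len//2]; the isinstance(l,int) branch cannot
-- fire for a list argument and is not part of the port.
def bitonic_minimum (l : List Int) : Int :=
  if l.length < 2 then
    (PySem.List.pyGet? l 0).getD 0
  else if (PySem.List.pyGet? l ((l.length / 2 : Nat) : Int)).getD 0
          < (PySem.List.pyGet? l (((l.length / 2 : Nat) : Int) - 1)).getD 0 then
    bitonic_minimum (PySem.List.slice l (some ((l.length / 2 : Nat) : Int)) none)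
  else
    bitonic_minimum (PySem.List.slice l none (some ((l.length / 2 : Nat) : Int)))
termination_by l.length
decreasing_by
  · simp only [PySem.List.slice_from_natCast, List.length_drop]; omega
  · simp only [PySem.List.slice_to_natCast, List.length_take]; omega

-- ===== PORT B =====
-- the while-loop of Source B: bounds lo/hi, mid = lo + (hi-lo)//2, shrink to the half
-- whose boundary comparison l[mid] < l[mid-1] holds; returns the final lo
def bmLoop (l : List Int) (lo hi : Nat) : Nat :=
  if 2 ≤ hi - lo then
    let mid := lo + (hi - lo) / 2
    if (PySem.List.pyGet? l ((mid : Nat) : Int)).getD 0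
        < (PySem.List.pyGet? l (((mid : Nat) : Int) - 1)).getD 0 then
      bmLoop l mid hi
    else
      bmLoop l lo mid
  else lo
termination_by hi - lo
decreasing_by all_goals omega

def bitonic_minimum_alt (l : List Int) : Int :=
  (PySem.List.pyGet? l ((bmLoop l 0 l.length : Nat) : Int)).getD 0

-- ===== PRECONDITION & SPEC =====
-- Pre_ excludes the empty list, on which the Python A (and B) raise IndexError.
def Pre_bitonic_minimum (l : List Int) : Prop := l ≠ []
instance (l : List Int) : Decidable (Pre_bitonic_minimum l) := by unfold Pre_bitonic_minimum; infer_instance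
def pvWitness_bitonic_minimum : List Int := [3, 1, 2]

def Spec_bitonic_minimum (l : List Int) (out : Int) : Prop := out = bitonic_minimum_alt l
instance (l : List Int) (out : Int) : Decidable (Spec_bitonic_minimum l out) := by unfold Spec_bitonic_minimum; infer_instance

-- ===== CLAIM (what is proved, stated in full; the proofs are below) =====
def Claim_equal_bitonic_minimum : Prop := ∀ (l : List Int), Dom_bitonic_minimum l → Pre_bitonic_minimum l → Spec_bitonic_minimum l (bitonic_minimum l)

-- ===== LEMMAS AND PROOFS =====

-- the window l[lo:hi] that B's bounds describe
def bmWindow (l : List Int) (lo hi : Nat) : List Int := (l.drop lo).take (hi - lo)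

theorem bmWindow_length {l : List Int} {lo hi : Nat} (_ : lo ≤ hi) (h2 : hi ≤ l.length) :
    (bmWindow l lo hi).length = hi - lo := by
  simp [bmWindow]; omega

theorem bmWindow_get? {l : List Int} (lo hi k : Nat) (hk : k < hi - lo) :
    (bmWindow l lo hi)[k]? = l[lo + k]? := by
  simp [bmWindow, hk, List.getElem?_drop]

-- main invariant: A on the window l[lo:hi] equals l[bmLoop l lo hi]
theorem bm_invariant (l : List Int) (lo hi : Nat) (hlo : lo < hi) (hhi : hi ≤ l.length) :
    bitonic_minimum (bmWindow l lo hi)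
      = (PySem.List.pyGet? l ((bmLoop l lo hi : Nat) : Int)).getD 0 := by
  rw [bmLoop]
  by_cases h2 : 2 ≤ hi - lo
  · simp only [if_pos h2]
    rw [bitonic_minimum]
    have hlen : (bmWindow l lo hi).length = hi - lo := bmWindow_length (by omega) hhi
    have hm : (hi - lo) / 2 ≥ 1 := by omega
    have hmlt : (hi - lo) / 2 < hi - lo := by omega
    have e1 : PySem.List.pyGet? (bmWindow l lo hi) (((hi - lo) / 2 : Nat) : Int)
        = PySem.List.pyGet? l ((lo + (hi - lo) / 2 : Nat) : Int) := by
      rw [PySem.List.pyGet?_natCast, PySem.List.pyGet?_natCast, bmWindow_get? lo hi _ hmlt]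
    have e2 : PySem.List.pyGet? (bmWindow l lo hi) ((((hi - lo) / 2 : Nat) : Int) - 1)
        = PySem.List.pyGet? l (((lo + (hi - lo) / 2 : Nat) : Int) - 1) := by
      have c1 : (((hi - lo) / 2 : Nat) : Int) - 1 = (((hi - lo) / 2 - 1 : Nat) : Int) := by omega
      have c2 : ((lo + (hi - lo) / 2 : Nat) : Int) - 1 = ((lo + ((hi - lo) / 2 - 1) : Nat) : Int) := by
        omega
      rw [c1, c2, PySem.List.pyGet?_natCast, PySem.List.pyGet?_natCast,
        bmWindow_get? lo hi _ (by omega)]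
    rw [if_neg (by omega : ¬ (bmWindow l lo hi).length < 2), hlen, e1, e2]
    by_cases hc : (PySem.List.pyGet? l ((lo + (hi - lo) / 2 : Nat) : Int)).getD 0
        < (PySem.List.pyGet? l (((lo + (hi - lo) / 2 : Nat) : Int) - 1)).getD 0
    · rw [if_pos hc, if_pos hc]
      have hs : PySem.List.slice (bmWindow l lo hi) (some (((hi - lo) / 2 : Nat) : Int)) none
          = bmWindow l (lo + (hi - lo) / 2) hi := by
        rw [PySem.List.slice_from_natCast]
        simp [bmWindow, List.drop_take, List.drop_drop]
        omega
      rw [hs, bm_invariant l (lo + (hi - lo) / 2) hi (by omega) hhi]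
    · rw [if_neg hc, if_neg hc]
      have hs : PySem.List.slice (bmWindow l lo hi) none (some (((hi - lo) / 2 : Nat) : Int))
          = bmWindow l lo (lo + (hi - lo) / 2) := by
        rw [PySem.List.slice_to_natCast]
        simp [bmWindow, List.take_take]
        omega
      rw [hs, bm_invariant l lo (lo + (hi - lo) / 2) (by omega) (by omega)]
  · -- hi - lo = 1: A returns window[0], B returns lo
    rw [bitonic_minimum]
    have hlen : (bmWindow l lo hi).length = 1 := by
      rw [bmWindow_length (by omega) hhi]; omega
    rw [if_pos (by omega : (bmWindow l lo hi).length < 2), if_neg h2]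
    rw [show (0 : Int) = ((0 : Nat) : Int) from rfl, PySem.List.pyGet?_natCast,
      PySem.List.pyGet?_natCast, bmWindow_get? lo hi 0 (by omega)]
    simp
termination_by hi - lo
decreasing_by all_goals omega

-- ===== VERDICT (by name: the statement is the Claim_ definition above) =====
theorem bitonic_minimum_spec : Claim_equal_bitonic_minimum := by
  intro l _ hpre
  have hlen : 0 < l.length := List.length_pos_iff.mpr hpre
  have := bm_invariant l 0 l.length hlen le_rfl
  simp only [bmWindow, List.drop_zero, Nat.sub_zero, List.take_length] at this
  exact this
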